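-- pv_equiv track=rewrite | github.com/tkgsn/priv_traj_gen | MTNet/make_training_data.py | compensate_edge
-- ===== SOURCE A (Python) =====
-- def compensate_edge(edge, n_bins):
--     '''
--     In the case, the edge is not neighboring, we compensate the edge by adding the edges between the two states
--     the route is the hamming way, from the direction of x-axis to the direction of y-axis
--     '''
--
--     from_state = edge[0]
--     to_state = edge[1]
--     from_x = from_state % (n_bins+2)
--     from_y = from_state // (n_bins+2)
--     to_x = to_state % (n_bins+2)
--     to_y = to_state // (n_bins+2)
--     x_sign = 1 if from_x < to_x else -1
--     y_sign = 1 if from_y < to_y else -1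
--
--     edges = []
--     for x in range(from_x, to_x, x_sign):
--         edges.append((from_y*(n_bins+2)+x, from_y*(n_bins+2)+x+x_sign))
--
--     for y in range(from_y, to_y, y_sign):
--         edges.append((y*(n_bins+2)+to_x, (y+y_sign)*(n_bins+2)+to_x))
--
--     return edges
-- ===== SOURCE B (Python) =====
-- def compensate_edge(edge, n_bins):
--     w = n_bins + 2
--     x, y = edge[0] % w, edge[0] // w
--     tx, ty = edge[1] % w, edge[1] // w
--     edges = []
--     cur = y * w + x
--     while (x, y) != (tx, ty):
--         if x != tx:
--             s = 1 if x < tx else -1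
--             nxt = cur + s
--             x += s
--         else:
--             s = 1 if y < ty else -1
--             nxt = cur + s * w
--             y += s
--         edges.append((cur, nxt))
--         cur = nxt
--     return edges
-- ===== Notes on version B (the rewrite author's own statement) =====
-- stated objective: alternative
-- what changed: B replaces A's two coordinate-range loops (each computing y*w+x from coordinates for every emitted pair) by a single while-loop state-space walker that keeps the current state and steps it by +-1 or +-w, re-deriving the step direction each iteration, accumulating (cur, next) edges.
import Mathlib
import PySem

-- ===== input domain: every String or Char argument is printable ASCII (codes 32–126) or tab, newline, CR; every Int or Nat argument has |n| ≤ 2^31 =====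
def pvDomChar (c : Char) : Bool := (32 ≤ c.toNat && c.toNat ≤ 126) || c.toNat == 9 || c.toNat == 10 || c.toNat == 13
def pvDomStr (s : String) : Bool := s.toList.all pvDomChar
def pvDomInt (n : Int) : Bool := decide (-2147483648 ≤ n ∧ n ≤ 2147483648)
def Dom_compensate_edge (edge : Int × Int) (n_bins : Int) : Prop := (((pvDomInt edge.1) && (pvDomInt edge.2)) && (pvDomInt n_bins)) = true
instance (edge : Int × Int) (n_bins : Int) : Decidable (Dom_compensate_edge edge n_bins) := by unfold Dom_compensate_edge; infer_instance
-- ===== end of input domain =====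

-- B replaces A's two coordinate-range loops by a single state-space walker: it keeps the
-- current STATE and steps it by ±1 (horizontal) or ±w (vertical) until the target is
-- reached, re-deriving the direction at each step (objective: alternative decomposition).

-- ===== PORT A =====
def compensate_edge (edge : Int × Int) (n_bins : Int) : List (Int × Int) :=
  let from_state := edge.1
  let to_state := edge.2
  let from_x := PySem.Int.mod from_state (n_bins + 2)
  let from_y := PySem.Int.floordiv from_state (n_bins + 2)
  let to_x := PySem.Int.mod to_state (n_bins + 2)
  let to_y := PySem.Int.floordiv to_state (n_bins + 2)
  let x_sign : Int := if from_x < to_x then 1 else -1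
  let y_sign : Int := if from_y < to_y then 1 else -1
  let edges : List (Int × Int) :=
    (PySem.List.pyRange from_x to_x x_sign).foldl
      (fun acc x => acc ++ [(from_y * (n_bins + 2) + x, from_y * (n_bins + 2) + x + x_sign)]) []
  let edges :=
    (PySem.List.pyRange from_y to_y y_sign).foldl
      (fun acc y => acc ++ [(y * (n_bins + 2) + to_x, (y + y_sign) * (n_bins + 2) + to_x)]) edges
  edges

-- ===== PORT B =====
-- the while-loop of Source B: state (x, y, cur, edges); terminates because the Manhattan
-- distance |tx - x| + |ty - y| shrinks at every step
def pvWalk (tx ty w : Int) (x y cur : Int) (acc : List (Int × Int)) : List (Int × Int) :=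
  if x = tx ∧ y = ty then acc
  else if _hx : x ≠ tx then
    let s : Int := if x < tx then 1 else -1
    pvWalk tx ty w (x + s) y (cur + s) (acc ++ [(cur, cur + s)])
  else
    let s : Int := if y < ty then 1 else -1
    pvWalk tx ty w x (y + s) (cur + s * w) (acc ++ [(cur, cur + s * w)])
termination_by ((tx - x).natAbs + (ty - y).natAbs)
decreasing_by all_goals (split_ifs <;> omega)

def compensate_edge_alt (edge : Int × Int) (n_bins : Int) : List (Int × Int) :=
  let w := n_bins + 2
  let x := PySem.Int.mod edge.1 w
  let y := PySem.Int.floordiv edge.1 w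
  let tx := PySem.Int.mod edge.2 w
  let ty := PySem.Int.floordiv edge.2 w
  pvWalk tx ty w x y (y * w + x) []

-- ===== PRECONDITION & SPEC =====
-- Pre_ excludes only n_bins = -2, where the Python A raises ZeroDivisionError (division by n_bins+2 = 0).
def Pre_compensate_edge (edge : Int × Int) (n_bins : Int) : Prop := n_bins ≠ -2
instance (edge : Int × Int) (n_bins : Int) : Decidable (Pre_compensate_edge edge n_bins) := by unfold Pre_compensate_edge; infer_instance
def pvWitness_compensate_edge : (Int × Int) × Int := ((3, 17), 2)

def Spec_compensate_edge (edge : Int × Int) (n_bins : Int) (out : List (Int × Int)) : Prop := out = compensate_edge_alt edge n_bins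
instance (edge : Int × Int) (n_bins : Int) (out : List (Int × Int)) : Decidable (Spec_compensate_edge edge n_bins out) := by unfold Spec_compensate_edge; infer_instance

-- ===== CLAIM (what is proved, stated in full; the proofs are below) =====
def Claim_equal_compensate_edge : Prop := ∀ (edge : Int × Int) (n_bins : Int), Dom_compensate_edge edge n_bins → Pre_compensate_edge edge n_bins → Spec_compensate_edge edge n_bins (compensate_edge edge n_bins)

-- ===== LEMMAS AND PROOFS =====

-- the push-append fold is the map
theorem foldl_push {α β : Type} (f : α → β) (l : List α) (init : List β) :
    l.foldl (fun acc x => acc ++ [f x]) init = init ++ l.map f := by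
  induction l generalizing init with
  | nil => simp
  | cons a l ih => simp [ih]

theorem pvWalk_done (tx ty w cur : Int) (acc : List (Int × Int)) :
    pvWalk tx ty w tx ty cur acc = acc := by
  rw [pvWalk]; simp

theorem pvWalk_h_pos (tx ty w y : Int) (x : Int) (hx : x ≤ tx) (acc : List (Int × Int)) :
    pvWalk tx ty w x y (y * w + x) acc
      = pvWalk tx ty w tx y (y * w + tx)
          (acc ++ (PySem.List.pyRange x tx 1).map (fun i => (y * w + i, y * w + i + 1))) := by
  induction hn : (tx - x).toNat generalizing x acc with
  | zero =>
    have : x = tx := by omega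
    subst this
    simp [PySem.List.pyRange_one_eq_nil le_rfl]
  | succ n ih =>
    have hlt : x < tx := by omega
    have h1 : ¬(x = tx ∧ y = ty) := by rintro ⟨h, _⟩; omega
    have key := ih (x + 1) (by omega) (acc ++ [(y * w + x, y * w + x + 1)]) (by omega)
    have hcur : y * w + (x + 1) = y * w + x + 1 := by ring
    rw [hcur] at key
    rw [pvWalk, if_neg h1, dif_pos (ne_of_lt hlt)]
    simp only [if_pos hlt]
    rw [key, PySem.List.pyRange_one_cons hlt]
    simp

theorem pvWalk_h_neg (tx ty w y : Int) (x : Int) (hx : tx ≤ x) (acc : List (Int × Int)) :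
    pvWalk tx ty w x y (y * w + x) acc
      = pvWalk tx ty w tx y (y * w + tx)
          (acc ++ (PySem.List.pyRange x tx (-1)).map (fun i => (y * w + i, y * w + i + -1))) := by
  induction hn : (x - tx).toNat generalizing x acc with
  | zero =>
    have : x = tx := by omega
    subst this
    simp [PySem.List.pyRange_neg_one_eq_nil le_rfl]
  | succ n ih =>
    have hlt : tx < x := by omega
    have h1 : ¬(x = tx ∧ y = ty) := by rintro ⟨h, _⟩; omega
    have key := ih (x - 1) (by omega) (acc ++ [(y * w + x, y * w + x + -1)]) (by omega)
    have hcur : y * w + (x - 1) = y * w + x + -1 := by ring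
    rw [hcur] at key
    have e1 : x + -1 = x - 1 := by ring
    rw [pvWalk, if_neg h1, dif_pos (ne_of_gt hlt)]
    simp only [if_neg (show ¬ x < tx by omega)]
    rw [e1, key, PySem.List.pyRange_neg_one_cons hlt]
    simp

theorem pvWalk_v_pos (tx ty w : Int) (y : Int) (hy : y ≤ ty) (acc : List (Int × Int)) :
    pvWalk tx ty w tx y (y * w + tx) acc
      = acc ++ (PySem.List.pyRange y ty 1).map (fun j => (j * w + tx, (j + 1) * w + tx)) := by
  induction hn : (ty - y).toNat generalizing y acc with
  | zero =>
    have : y = ty := by omega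
    subst this
    simp [PySem.List.pyRange_one_eq_nil le_rfl, pvWalk_done]
  | succ n ih =>
    have hlt : y < ty := by omega
    have h1 : ¬(tx = tx ∧ y = ty) := by rintro ⟨_, h⟩; omega
    have key := ih (y + 1) (by omega) (acc ++ [(y * w + tx, y * w + tx + 1 * w)]) (by omega)
    have hcur : (y + 1) * w + tx = y * w + tx + 1 * w := by ring
    rw [hcur] at key
    rw [pvWalk, if_neg h1, dif_neg (show ¬ tx ≠ tx by simp)]
    simp only [if_pos hlt]
    rw [key, PySem.List.pyRange_one_cons hlt]
    have hp : y * w + tx + 1 * w = (y + 1) * w + tx := by ring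
    rw [hp]
    simp

theorem pvWalk_v_neg (tx ty w : Int) (y : Int) (hy : ty ≤ y) (acc : List (Int × Int)) :
    pvWalk tx ty w tx y (y * w + tx) acc
      = acc ++ (PySem.List.pyRange y ty (-1)).map (fun j => (j * w + tx, (j + -1) * w + tx)) := by
  induction hn : (y - ty).toNat generalizing y acc with
  | zero =>
    have : y = ty := by omega
    subst this
    simp [PySem.List.pyRange_neg_one_eq_nil le_rfl, pvWalk_done]
  | succ n ih =>
    have hlt : ty < y := by omega
    have h1 : ¬(tx = tx ∧ y = ty) := by rintro ⟨_, h⟩; omega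
    have key := ih (y - 1) (by omega) (acc ++ [(y * w + tx, y * w + tx + -1 * w)]) (by omega)
    have hcur : (y - 1) * w + tx = y * w + tx + -1 * w := by ring
    rw [hcur] at key
    have e1 : y + -1 = y - 1 := by ring
    rw [pvWalk, if_neg h1, dif_neg (show ¬ tx ≠ tx by simp)]
    simp only [if_neg (show ¬ y < ty by omega)]
    rw [e1, key, PySem.List.pyRange_neg_one_cons hlt]
    have hp : y * w + tx + -1 * w = (y + -1) * w + tx := by ring
    rw [hp]
    simp

-- ===== VERDICT (by name: the statement is the Claim_ definition above) =====
theorem compensate_edge_spec : Claim_equal_compensate_edge := by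
  intro edge n_bins _ _
  unfold Spec_compensate_edge compensate_edge compensate_edge_alt
  dsimp only
  simp only [foldl_push, List.nil_append]
  set w := n_bins + 2 with hw
  set fx := PySem.Int.mod edge.1 w with hfx
  set fy := PySem.Int.floordiv edge.1 w with hfy
  set tx := PySem.Int.mod edge.2 w with htxd
  set ty := PySem.Int.floordiv edge.2 w with htyd
  by_cases hx : fx < tx <;> by_cases hy : fy < ty
  · rw [if_pos hx, if_pos hy, pvWalk_h_pos tx ty w fy fx (le_of_lt hx),
        pvWalk_v_pos tx ty w fy (le_of_lt hy)]
    simp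
  · rw [if_pos hx, if_neg hy, pvWalk_h_pos tx ty w fy fx (le_of_lt hx),
        pvWalk_v_neg tx ty w fy (not_lt.mp hy)]
    simp
  · rw [if_neg hx, if_pos hy, pvWalk_h_neg tx ty w fy fx (not_lt.mp hx),
        pvWalk_v_pos tx ty w fy (le_of_lt hy)]
    simp
  · rw [if_neg hx, if_neg hy, pvWalk_h_neg tx ty w fy fx (not_lt.mp hx),
        pvWalk_v_neg tx ty w fy (not_lt.mp hy)]
    simp
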